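-- pv_equiv track=rewrite | github.com/DayStayyy/Monopoly | consoles.py | FormatCellName
-- ===== SOURCE A (Python) =====
-- def FormatCellName(s, nbchar=-1):
--     if nbchar == -1:
--         length = len(s)
--     else:
--         length = nbchar
--     end = True
--     while length < 17:
--         if end == True:
--             s += " "
--             end = False
--         else:
--             s = " " + s
--             end = True
--         length += 1
--     return s
-- ===== SOURCE B (Python) =====
-- def FormatCellName(s, nbchar=-1):
--     length = len(s) if nbchar == -1 else nbchar
--     p = max(0, 17 - length)
--     return " " * (p // 2) + s + " " * (p - p // 2)
-- ===== Notes on version B (the rewrite author's own statement) =====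
-- stated objective: simpler
-- what changed: Replaces the one-character-at-a-time alternating while loop with a closed-form padding split: end side gets ceil(p/2), front side floor(p/2).
import Mathlib
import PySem

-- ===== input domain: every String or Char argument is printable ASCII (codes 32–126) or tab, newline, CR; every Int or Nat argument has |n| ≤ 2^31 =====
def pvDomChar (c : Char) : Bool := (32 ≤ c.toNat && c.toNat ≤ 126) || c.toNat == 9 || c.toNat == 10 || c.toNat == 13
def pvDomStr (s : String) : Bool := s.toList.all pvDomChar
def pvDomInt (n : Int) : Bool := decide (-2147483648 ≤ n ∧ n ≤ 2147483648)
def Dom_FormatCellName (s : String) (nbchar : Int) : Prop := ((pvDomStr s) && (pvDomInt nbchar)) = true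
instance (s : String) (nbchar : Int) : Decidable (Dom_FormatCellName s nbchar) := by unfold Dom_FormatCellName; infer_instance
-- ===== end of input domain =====

-- B replaces A's one-character-at-a-time alternating padding loop by a closed-form split of the pad count; objective: simpler.

-- ===== PORT A =====
-- the while loop runs exactly (17 - length).toNat times (length increases by 1 each pass); ported as fuel recursion over that count
def pvPadLoopA : Nat → String → Bool → String
  | 0, s, _ => s
  | n + 1, s, e =>
    if e = true then pvPadLoopA n (s ++ " ") false
    else pvPadLoopA n (" " ++ s) true

def FormatCellName (s : String) (nbchar : Int) : String :=
  let length : Int := if nbchar = -1 then (s.toList.length : Int) else nbchar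
  pvPadLoopA (17 - length).toNat s true

-- ===== PORT B =====
def FormatCellName_alt (s : String) (nbchar : Int) : String :=
  let length : Int := if nbchar = -1 then (s.toList.length : Int) else nbchar
  let p : Nat := (max 0 (17 - length)).toNat  -- p ≥ 0, so Python's p // 2 is Nat division p / 2 (exact)
  String.ofList (List.replicate (p / 2) ' ') ++ s ++ String.ofList (List.replicate (p - p / 2) ' ')

-- ===== PRECONDITION & SPEC =====
def Spec_FormatCellName (s : String) (nbchar : Int) (out : String) : Prop := out = FormatCellName_alt s nbchar
instance (s : String) (nbchar : Int) (out : String) : Decidable (Spec_FormatCellName s nbchar out) := by unfold Spec_FormatCellName; infer_instance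

-- ===== CLAIM (what is proved, stated in full; the proofs are below) =====
def Claim_equal_FormatCellName : Prop := ∀ (s : String) (nbchar : Int), Dom_FormatCellName s nbchar → Spec_FormatCellName s nbchar (FormatCellName s nbchar)

-- ===== LEMMAS AND PROOFS =====

theorem pvPadLoopA_closed : ∀ (n : Nat) (s : String),
    pvPadLoopA n s true = String.ofList (List.replicate (n / 2) ' ') ++ s ++ String.ofList (List.replicate (n - n / 2) ' ')
    ∧ pvPadLoopA n s false = String.ofList (List.replicate (n - n / 2) ' ') ++ s ++ String.ofList (List.replicate (n / 2) ' ') := by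
  intro n
  induction n with
  | zero => intro s; simp [pvPadLoopA]
  | succ n ih =>
    intro s
    have hdiv : (n + 1) / 2 = n - n / 2 := by omega
    have hsub : (n + 1) - (n - n / 2) = n / 2 + 1 := by omega
    have hsp : (" " : String) = String.ofList [' '] := rfl
    refine ⟨?_, ?_⟩
    · show pvPadLoopA n (s ++ " ") false = _
      rw [(ih (s ++ " ")).2, hdiv, hsub, hsp]
      simp [String.append_assoc, List.replicate_succ']
      rw [hsp, ← String.ofList_append, ← String.ofList_append,
        List.singleton_append, ← List.replicate_succ, List.replicate_succ']
    · show pvPadLoopA n (" " ++ s) true = _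
      rw [(ih (" " ++ s)).1, hdiv, hsub, hsp]
      simp [← String.append_assoc, List.replicate_succ]
      rw [hsp, ← String.ofList_append, ← List.replicate_succ', List.replicate_succ]

-- ===== VERDICT (by name: the statement is the Claim_ definition above) =====
theorem FormatCellName_spec : Claim_equal_FormatCellName := by
  intro s nbchar _
  unfold Spec_FormatCellName FormatCellName FormatCellName_alt
  have hmax : (max 0 (17 - (if nbchar = -1 then (s.toList.length : Int) else nbchar))).toNat
      = (17 - (if nbchar = -1 then (s.toList.length : Int) else nbchar)).toNat := by omega
  simp only [hmax]
  exact (pvPadLoopA_closed _ s).1
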